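-- pv_equiv track=rewrite | github.com/diegonmarcos/cloud | a_solutions/back-cloud_control_center/c3-in_house/v2/front/cloud_json_md.py | api_errors
-- ===== SOURCE A (Python) =====
-- def table(headers: list[str], rows: list[list[str]]) -> str:
--     """Generate a markdown table."""
--     if not rows:
--         return "*No data*\n"
--
--     widths = [len(h) for h in headers]
--     for row in rows:
--         for i, cell in enumerate(row):
--             if i < len(widths):
--                 widths[i] = max(widths[i], len(str(cell)))
--
--     lines = []
--     lines.append("| " + " | ".join(h.ljust(widths[i]) for i, h in enumerate(headers)) + " |")
--     lines.append("| " + " | ".join("-" * widths[i] for i in range(len(headers))) + " |")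
--     for row in rows:
--         lines.append("| " + " | ".join(str(cell).ljust(widths[i]) for i, cell in enumerate(row)) + " |")
--
--     return "\n".join(lines) + "\n"
--
-- def api_errors(data: dict) -> str:
--     output = []
--     output.append("## Error Codes\n")
--
--     errors = data.get("errors", {})
--     rows = [[code, e.get("code", ""), e.get("message", "")] for code, e in errors.items()]
--     output.append(table(["HTTP Code", "Error Code", "Message"], rows))
--
--     output.append("### Rate Limits\n")
--     limits = data.get("rateLimits", {})
--     rows = [[name, str(l.get("requests", "")), l.get("window", "")] for name, l in limits.items()]
--     output.append(table(["Category", "Requests", "Window"], rows))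
--
--     return "\n".join(output)
-- ===== SOURCE B (Python) =====
-- def _pad_col(header, cells):
--     """One fully padded column: padded header, dash rule, padded cells."""
--     w = len(header)
--     for c in cells:
--         w = max(w, len(c))
--     return [header.ljust(w), "-" * w] + [c.ljust(w) for c in cells]
--
--
-- def table(headers, rows):
--     """Markdown table built column-major: pad each column fully (header,
--     dash rule, cells), then transpose the padded columns into lines."""
--     if not rows:
--         return "*No data*\n"
--     cols = [_pad_col(h, [str(r[i]) for r in rows]) for i, h in enumerate(headers)]
--     return "".join("| " + " | ".join(line) + " |\n" for line in zip(*cols))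
--
--
-- def api_errors(data):
--     errors = data.get("errors", {})
--     err_rows = [[code, e.get("code", ""), e.get("message", "")] for code, e in errors.items()]
--     limits = data.get("rateLimits", {})
--     lim_rows = [[name, str(l.get("requests", "")), l.get("window", "")] for name, l in limits.items()]
--     return "\n".join([
--         "## Error Codes\n",
--         table(["HTTP Code", "Error Code", "Message"], err_rows),
--         "### Rate Limits\n",
--         table(["Category", "Requests", "Window"], lim_rows),
--     ])
-- ===== Notes on version B (the rewrite author's own statement) =====
-- stated objective: alternative
-- what changed: The table is built column-major instead of row-major: there is no widths list and no separate header/separator/row builders; each column is padded independently (its width computed locally, its padded header, dash rule and padded cells emitted together) and the output lines are obtained by transposing the padded columns with zip(*cols), each line terminated by its own newline instead of a final join.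
import Mathlib
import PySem

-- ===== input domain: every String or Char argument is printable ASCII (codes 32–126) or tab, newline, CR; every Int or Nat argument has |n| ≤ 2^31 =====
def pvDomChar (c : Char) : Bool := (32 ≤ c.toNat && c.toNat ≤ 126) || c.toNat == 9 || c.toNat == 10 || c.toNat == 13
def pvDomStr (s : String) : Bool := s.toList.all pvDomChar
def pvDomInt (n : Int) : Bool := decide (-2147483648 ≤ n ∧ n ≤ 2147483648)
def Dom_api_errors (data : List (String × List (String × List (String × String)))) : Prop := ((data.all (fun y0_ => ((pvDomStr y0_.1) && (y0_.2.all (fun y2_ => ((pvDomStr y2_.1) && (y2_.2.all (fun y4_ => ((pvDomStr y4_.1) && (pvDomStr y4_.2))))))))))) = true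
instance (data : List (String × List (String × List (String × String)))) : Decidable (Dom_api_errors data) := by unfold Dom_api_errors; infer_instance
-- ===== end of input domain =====

-- B builds each table column-major: no widths list and no separate header/separator/row builders —
-- each column is padded independently (local width, padded header, dash rule, padded cells together)
-- and the lines are the transpose of the padded columns, each carrying its own trailing newline
-- (objective: alternative decomposition; same cost).

-- shared primitive ports of Python's str.ljust(w) and "-" * n (exact: right-pad with spaces / repeat)
def pyLjust (s : String) (w : Int) : String :=
  s ++ String.ofList (List.replicate (w - PySem.Str.len s).toNat ' ')

def pyDashes (w : Int) : String :=
  String.ofList (List.replicate w.toNat '-')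

-- ===== PORT A =====
-- table(headers, rows): running-max widths, then header/separator/row lines by index
def tableA (headers : List String) (rows : List (List String)) : String :=
  if rows = [] then "*No data*\n" else
    let widths0 := headers.map PySem.Str.len
    let widths := rows.foldl (fun ws row =>
      (PySem.List.enumerate row 0).foldl (fun ws ic =>
        if ic.1 < PySem.List.len ws then
          -- widths[i] = max(widths[i], len(cell)): i is a nonneg in-range index here, so set/getD at i.toNat is exact
          ws.set ic.1.toNat (max (ws.getD ic.1.toNat 0) (PySem.Str.len ic.2))
        else ws) ws) widths0
    let line1 := "| " ++ PySem.Str.join " | " ((PySem.List.enumerate headers 0).map (fun ih => pyLjust ih.2 (widths.getD ih.1.toNat 0))) ++ " |"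
    let line2 := "| " ++ PySem.Str.join " | " ((PySem.List.pyRange 0 (PySem.List.len headers) 1).map (fun i => pyDashes (widths.getD i.toNat 0))) ++ " |"
    let body := rows.map (fun row => "| " ++ PySem.Str.join " | " ((PySem.List.enumerate row 0).map (fun ic => pyLjust ic.2 (widths.getD ic.1.toNat 0))) ++ " |")
    PySem.Str.join "\n" (line1 :: line2 :: body) ++ "\n"

def api_errors (data : List (String × List (String × List (String × String)))) : String :=
  let errors := (PySem.Dict.ofList data).getD "errors" []
  let rows1 := (PySem.Dict.ofList errors).items.map (fun ce =>
    [ce.1, (PySem.Dict.ofList ce.2).getD "code" "", (PySem.Dict.ofList ce.2).getD "message" ""])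
  let limits := (PySem.Dict.ofList data).getD "rateLimits" []
  let rows2 := (PySem.Dict.ofList limits).items.map (fun nl =>
    [nl.1, (PySem.Dict.ofList nl.2).getD "requests" "", (PySem.Dict.ofList nl.2).getD "window" ""])
  PySem.Str.join "\n" ["## Error Codes\n",
    tableA ["HTTP Code", "Error Code", "Message"] rows1,
    "### Rate Limits\n",
    tableA ["Category", "Requests", "Window"] rows2]

-- ===== PORT B =====
-- _pad_col(header, cells): local running-max width, then padded header, dash rule, padded cells
def padCol (header : String) (cells : List String) : List String :=
  let w := cells.foldl (fun a c => max a (PySem.Str.len c)) (PySem.Str.len header)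
  pyLjust header w :: pyDashes w :: cells.map (fun c => pyLjust c w)

-- zip(*cols): truncating transpose of the padded columns
def pyZipRows : List String → List (List String) → List (List String)
  | [], _ => []
  | x :: xs, rest =>
    if rest.any (·.isEmpty) then []
    else (x :: rest.map (·.headD "")) :: pyZipRows xs (rest.map (·.tail))

def tableB (headers : List String) (rows : List (List String)) : String :=
  if rows = [] then "*No data*\n" else
    -- str(r[i]): r[i] is in range at every call site here (rows have exactly len(headers) cells), so getD is exact
    let cols := (PySem.List.enumerate headers 0).map (fun ih =>
      padCol ih.2 (rows.map (fun r => r.getD ih.1.toNat "")))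
    let lns := match cols with
      | [] => []
      | c :: cs => pyZipRows c cs
    PySem.Str.join "" (lns.map (fun cells => "| " ++ PySem.Str.join " | " cells ++ " |\n"))

def api_errors_alt (data : List (String × List (String × List (String × String)))) : String :=
  let errors := (PySem.Dict.ofList data).getD "errors" []
  let err_rows := (PySem.Dict.ofList errors).items.map (fun ce =>
    [ce.1, (PySem.Dict.ofList ce.2).getD "code" "", (PySem.Dict.ofList ce.2).getD "message" ""])
  let limits := (PySem.Dict.ofList data).getD "rateLimits" []
  let lim_rows := (PySem.Dict.ofList limits).items.map (fun nl =>
    [nl.1, (PySem.Dict.ofList nl.2).getD "requests" "", (PySem.Dict.ofList nl.2).getD "window" ""])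
  PySem.Str.join "\n" ["## Error Codes\n",
    tableB ["HTTP Code", "Error Code", "Message"] err_rows,
    "### Rate Limits\n",
    tableB ["Category", "Requests", "Window"] lim_rows]

-- ===== PRECONDITION & SPEC =====
def Spec_api_errors (data : List (String × List (String × List (String × String)))) (out : String) : Prop := out = api_errors_alt data
instance (data : List (String × List (String × List (String × String)))) (out : String) : Decidable (Spec_api_errors data out) := by unfold Spec_api_errors; infer_instance

-- ===== CLAIM (what is proved, stated in full; the proofs are below) =====
def Claim_equal_api_errors : Prop := ∀ (data : List (String × List (String × List (String × String)))), Dom_api_errors data → Spec_api_errors data (api_errors data)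

-- ===== LEMMAS AND PROOFS =====

-- A's running-max width pass over length-3 rows is three independent column folds
theorem widthsA_eq (rows : List (List String)) (h : ∀ r ∈ rows, r.length = 3)
    (w0 w1 w2 : Int) :
    rows.foldl (fun ws row =>
      (PySem.List.enumerate row 0).foldl (fun ws ic =>
        if ic.1 < PySem.List.len ws then
          ws.set ic.1.toNat (max (ws.getD ic.1.toNat 0) (PySem.Str.len ic.2))
        else ws) ws) [w0, w1, w2] =
    [rows.foldl (fun acc r => max acc (PySem.Str.len (r.getD 0 ""))) w0,
     rows.foldl (fun acc r => max acc (PySem.Str.len (r.getD 1 ""))) w1,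
     rows.foldl (fun acc r => max acc (PySem.Str.len (r.getD 2 ""))) w2] := by
  induction rows generalizing w0 w1 w2 with
  | nil => rfl
  | cons r rs ih =>
    have hr := h r (by simp)
    match r, hr with
    | [x, y, z], _ =>
      rw [List.foldl_cons, List.foldl_cons, List.foldl_cons, List.foldl_cons]
      have hstep : (PySem.List.enumerate [x, y, z] 0).foldl (fun ws ic =>
          if ic.1 < PySem.List.len ws then
            ws.set ic.1.toNat (max (ws.getD ic.1.toNat 0) (PySem.Str.len ic.2))
          else ws) [w0, w1, w2] =
          [max w0 (PySem.Str.len x), max w1 (PySem.Str.len y), max w2 (PySem.Str.len z)] := by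
        simp [PySem.List.enumerate_cons, PySem.List.enumerate_nil, PySem.List.len_eq]
      rw [hstep, ih (fun r hr => h r (List.mem_cons_of_mem _ hr))]
      simp

-- one step of the truncating transpose on three nonempty columns
theorem pyZipRows_step (x y z : String) (xs ys zs : List String) :
    pyZipRows (x :: xs) [y :: ys, z :: zs] = [x, y, z] :: pyZipRows xs [ys, zs] := by
  simp [pyZipRows]

-- transposing three columns that are maps over the same list gives one line per element
theorem pyZipRows_maps {α : Type} (f g k : α → String) (l : List α) :
    pyZipRows (l.map f) [l.map g, l.map k] = l.map (fun r => [f r, g r, k r]) := by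
  induction l with
  | nil => rfl
  | cons r rs ih => simp only [List.map_cons, pyZipRows_step, ih]

-- sep.join over two-or-more parts peels its head (proved at the char-list level)
theorem join_cc (sep x y : String) (ls : List String) :
    PySem.Str.join sep (x :: y :: ls) = x ++ sep ++ PySem.Str.join sep (y :: ls) := by
  rw [← String.toList_inj]
  simp [PySem.Str.toList_join, PySem.Chars.join_cons_cons]

theorem join_single (sep x : String) : PySem.Str.join sep [x] = x := by
  rw [← String.toList_inj]
  simp [PySem.Str.toList_join, PySem.Chars.join_singleton]

-- "".join of newline-terminated lines = "\n".join of the lines plus a final newline (nonempty list)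
theorem join_newline (x : String) (ls : List String) :
    PySem.Str.join "" ((x :: ls).map (fun s => s ++ "\n")) =
      PySem.Str.join "\n" (x :: ls) ++ "\n" := by
  induction ls generalizing x with
  | nil => simp [join_single]
  | cons y ys ih =>
    simp only [List.map_cons] at ih ⊢
    rw [join_cc, join_cc, ih y]
    simp [String.append_assoc]

theorem table_eq (a b c : String) (rows : List (List String))
    (h : ∀ r ∈ rows, r.length = 3) : tableA [a, b, c] rows = tableB [a, b, c] rows := by
  by_cases hrows : rows = []
  · subst hrows; unfold tableA tableB; simp
  · unfold tableA tableB
    rw [if_neg hrows, if_neg hrows]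
    simp only [List.map_cons, List.map_nil]
    rw [widthsA_eq rows h]
    simp only [PySem.List.enumerate_cons, PySem.List.enumerate_nil, List.map_cons, List.map_nil,
      padCol, List.foldl_map,
      show Int.toNat 0 = 0 from rfl, show ((0:Int)+1).toNat = 1 from rfl,
      show ((0:Int)+1+1).toNat = 2 from rfl,
      List.getD_cons_zero, List.getD_cons_succ]
    generalize rows.foldl (fun acc r => max acc (PySem.Str.len (r.getD 0 ""))) (PySem.Str.len a) = W0
    generalize rows.foldl (fun acc r => max acc (PySem.Str.len (r.getD 1 ""))) (PySem.Str.len b) = W1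
    generalize rows.foldl (fun acc r => max acc (PySem.Str.len (r.getD 2 ""))) (PySem.Str.len c) = W2
    have hzip : pyZipRows
        (pyLjust a W0 :: pyDashes W0 :: rows.map (fun r => pyLjust (r.getD 0 "") W0))
        [pyLjust b W1 :: pyDashes W1 :: rows.map (fun r => pyLjust (r.getD 1 "") W1),
         pyLjust c W2 :: pyDashes W2 :: rows.map (fun r => pyLjust (r.getD 2 "") W2)] =
        [pyLjust a W0, pyLjust b W1, pyLjust c W2] ::
        [pyDashes W0, pyDashes W1, pyDashes W2] ::
        rows.map (fun r => [pyLjust (r.getD 0 "") W0, pyLjust (r.getD 1 "") W1, pyLjust (r.getD 2 "") W2]) := by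
      rw [pyZipRows_step, pyZipRows_step, pyZipRows_maps]
    simp only [List.map_map] at hzip ⊢
    simp only [Function.comp_def]
    rw [hzip, ← join_newline]
    have hrange : PySem.List.pyRange 0 (PySem.List.len ([a, b, c] : List String)) 1 = [0, 1, 2] := by
      have h3 : PySem.List.len ([a, b, c] : List String) = 3 := by simp [PySem.List.len_eq]
      rw [h3]; decide
    have hl : (" |" : String) ++ "\n" = " |\n" := by decide
    rw [hrange]
    congr 1
    simp only [List.map_cons, List.map_map]
    refine List.cons_eq_cons.mpr ⟨?_, List.cons_eq_cons.mpr ⟨?_, ?_⟩⟩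
    · simp [String.append_assoc, hl]
    · simp [String.append_assoc, hl]
    · refine List.map_congr_left ?_
      intro r hr
      have h3 := h r hr
      match r, h3 with
      | [x, y, z], _ =>
        simp [PySem.List.enumerate_cons, PySem.List.enumerate_nil, String.append_assoc, hl]

-- ===== VERDICT (by name: the statement is the Claim_ definition above) =====
theorem api_errors_spec : Claim_equal_api_errors := by
  intro data _
  show api_errors data = api_errors_alt data
  unfold api_errors api_errors_alt
  simp only
  rw [table_eq, table_eq] <;>
    intro r hr <;> simp only [List.mem_map] at hr <;> obtain ⟨p, _, rfl⟩ := hr <;> rfl
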